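-- pv_equiv track=rewrite | github.com/bambamshivam/Codeforces | ANCC_IIT_SOCP_Kickstart_Assignment/pattern.py | pat
-- ===== SOURCE A (Python) =====
-- def pat(s):
-- 	n=len(s)
-- 	if n==1 or n==0:
-- 		return True
-- 	else:
-- 		if not pal(s):
-- 			return False
-- 		else:
-- 			return pat(s[:n//2]) and pat(s[(n-n//2):])
--
-- def pal(s):
-- 	for i in range(len(s)):
-- 		if s[i]!=s[len(s)-i-1]:
-- 			return False
-- 	return True
-- ===== SOURCE B (Python) =====
-- def pat(s):
--     stack = [s]
--     while stack:
--         t = stack.pop()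
--         n = len(t)
--         if n <= 1:
--             continue
--         if t != t[::-1]:
--             return False
--         h = n // 2
--         stack.append(t[:h])
--         stack.append(t[n - h:])
--     return True
-- ===== Notes on version B (the rewrite author's own statement) =====
-- stated objective: alternative
-- what changed: Replaces A's recursion and index-by-index palindrome loop with an explicit worklist (stack) of segments and a slice-based palindrome test t != t[::-1].
import Mathlib
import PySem

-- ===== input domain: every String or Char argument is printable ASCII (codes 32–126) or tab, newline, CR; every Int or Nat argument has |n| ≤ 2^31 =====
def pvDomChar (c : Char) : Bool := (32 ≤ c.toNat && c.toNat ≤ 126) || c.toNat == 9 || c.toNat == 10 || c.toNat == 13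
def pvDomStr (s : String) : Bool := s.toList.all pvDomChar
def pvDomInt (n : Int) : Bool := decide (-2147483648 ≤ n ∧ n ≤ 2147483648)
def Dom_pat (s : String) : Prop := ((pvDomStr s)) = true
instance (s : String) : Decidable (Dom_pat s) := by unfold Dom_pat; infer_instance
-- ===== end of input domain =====

-- B replaces A's recursion and per-index palindrome loop by an explicit worklist of
-- segments with a reverse-comparison palindrome test (alternative decomposition, same cost).

-- ===== PORT A =====
-- pal: 'for i in range(len(s)): if s[i] != s[len(s)-i-1]: return False' — loop over the
-- index list with early return; indices are in range, so pyGetD is exact.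
def pvPalLoopA (l : List Char) : List Int → Bool
  | [] => true
  | i :: is =>
    if PySem.List.pyGetD l i ' ' ≠ PySem.List.pyGetD l ((l.length : Int) - i - 1) ' ' then false
    else pvPalLoopA l is

def pvPalA (l : List Char) : Bool := pvPalLoopA l (PySem.List.pyRange 0 (l.length : Int) 1)

-- pat: Python's n//2 on the nonnegative n = len(s) is exactly Nat division, and the slices
-- s[:n//2] / s[(n-n//2):] with nonnegative in-range bounds are exactly take/drop.
def pvPatA (l : List Char) : Bool :=
  let n := l.length
  if n = 1 ∨ n = 0 then true
  else if !pvPalA l then false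
  else pvPatA (l.take (n / 2)) && pvPatA (l.drop (n - n / 2))
termination_by l.length
decreasing_by
  · simp only [List.length_take]; omega
  · simp only [List.length_drop]; omega

def pat (s : String) : Bool := pvPatA s.toList

-- ===== PORT B =====
-- worklist loop: pop a segment; short segments pass, a non-palindrome (t != t[::-1], i.e.
-- t ≠ t.reverse) fails, otherwise push the two halves (second half on top, as Source B does).
def pvPatBLoop : List (List Char) → Bool
  | [] => true
  | t :: rest =>
    if t.length ≤ 1 then pvPatBLoop rest
    else if t ≠ t.reverse then false
    else pvPatBLoop (t.drop (t.length - t.length / 2) :: t.take (t.length / 2) :: rest)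
termination_by stack => (stack.map (fun t => 3 ^ t.length)).sum
decreasing_by
  · have h1 : 1 ≤ 3 ^ t.length := Nat.one_le_pow _ _ (by omega)
    simp only [List.map_cons, List.sum_cons]; omega
  · rename_i h _
    simp only [List.map_cons, List.sum_cons, List.length_drop, List.length_take]
    have _hn : 2 ≤ t.length := by omega
    have e0 : 1 ≤ 3 ^ (t.length - 1) := Nat.one_le_pow _ _ (by omega)
    have e1 : 3 ^ (t.length - (t.length - t.length / 2)) ≤ 3 ^ (t.length - 1) :=
      Nat.pow_le_pow_right (by omega) (by omega)
    have e2 : 3 ^ (min (t.length / 2) t.length) ≤ 3 ^ (t.length - 1) :=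
      Nat.pow_le_pow_right (by omega) (by omega)
    have e3 : 3 ^ (t.length - 1) * 3 = 3 ^ t.length := by
      rw [← Nat.pow_succ]; congr 1; omega
    omega

def pat_alt (s : String) : Bool := pvPatBLoop [s.toList]

-- ===== PRECONDITION & SPEC =====
def Spec_pat (s : String) (out : Bool) : Prop := out = pat_alt s
instance (s : String) (out : Bool) : Decidable (Spec_pat s out) := by unfold Spec_pat; infer_instance

-- ===== CLAIM (what is proved, stated in full; the proofs are below) =====
def Claim_equal_pat : Prop := ∀ (s : String), Dom_pat s → Spec_pat s (pat s)

-- ===== LEMMAS AND PROOFS =====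

theorem pvPalLoopA_all (l : List Char) (is : List Int) :
    pvPalLoopA l is =
      is.all (fun i => PySem.List.pyGetD l i ' ' = PySem.List.pyGetD l ((l.length : Int) - i - 1) ' ') := by
  induction is with
  | nil => rfl
  | cons i is ih =>
    simp only [pvPalLoopA, List.all_cons, ih]
    by_cases h : PySem.List.pyGetD l i ' ' = PySem.List.pyGetD l ((l.length : Int) - i - 1) ' ' <;>
      simp [h]

theorem pvPalA_eq (l : List Char) : pvPalA l = decide (l = l.reverse) := by
  cases hb : pvPalA l
  · symm
    simp only [decide_eq_false_iff_not]
    intro hrev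
    rw [pvPalA, pvPalLoopA_all] at hb
    rw [List.all_eq_false] at hb
    obtain ⟨i, hi, hne⟩ := hb
    rw [PySem.List.mem_pyRange_one] at hi
    simp only [decide_eq_true_eq] at hne
    apply hne
    have h0 : 0 ≤ i := hi.1
    have hlt : i < (l.length : Int) := hi.2
    rw [PySem.List.pyGetD_eq_getElem l ' ' h0 hlt,
        PySem.List.pyGetD_eq_getElem l ' ' (by omega) (by omega)]
    have hidx : ((l.length : Int) - i - 1).toNat = l.length - 1 - i.toNat := by omega
    simp only [hidx]
    rw [← List.getElem_reverse]
    exact List.getElem_of_eq hrev _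
  · symm
    simp only [decide_eq_true_eq]
    rw [pvPalA, pvPalLoopA_all, List.all_eq_true] at hb
    apply List.ext_getElem (by simp)
    intro k hk _
    rw [List.getElem_reverse]
    have hmem : (k : Int) ∈ PySem.List.pyRange 0 (l.length : Int) 1 := by
      rw [PySem.List.mem_pyRange_one]; omega
    have := hb _ hmem
    simp only [decide_eq_true_eq] at this
    rw [PySem.List.pyGetD_eq_getElem l ' ' (by omega) (by omega),
        PySem.List.pyGetD_eq_getElem l ' ' (by omega) (by omega)] at this
    convert this using 2; omega

-- the worklist processes exactly A's recursion tree: popping t contributes pvPatA t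
theorem pvPatBLoop_cons (t : List Char) (rest : List (List Char)) :
    pvPatBLoop (t :: rest) = (pvPatA t && pvPatBLoop rest) := by
  induction hn : t.length using Nat.strong_induction_on generalizing t rest with
  | _ n ih =>
  subst hn
  rw [pvPatBLoop, pvPatA]
  by_cases h1 : t.length ≤ 1
  · have hc : t.length = 1 ∨ t.length = 0 := by omega
    rw [if_pos h1, if_pos hc, Bool.true_and]
  · have hcond : ¬ (t.length = 1 ∨ t.length = 0) := by omega
    rw [if_neg h1, if_neg hcond]
    by_cases hp : t = t.reverse
    · have hpal : pvPalA t = true := by rw [pvPalA_eq]; exact decide_eq_true hp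
      rw [if_neg (not_not_intro hp)]
      rw [ih _ (by simp only [List.length_drop]; omega) _ _ rfl,
          ih _ (by simp only [List.length_take]; omega) _ _ rfl]
      rw [hpal]
      simp only [Bool.not_true, Bool.false_eq_true, if_false]
      cases pvPatA (t.take (t.length / 2)) <;>
        cases pvPatA (t.drop (t.length - t.length / 2)) <;>
        cases pvPatBLoop rest <;> rfl
    · have hpal : pvPalA t = false := by rw [pvPalA_eq]; exact decide_eq_false hp
      rw [if_pos hp, hpal]
      simp only [Bool.not_false, if_true, Bool.false_and]

-- ===== VERDICT (by name: the statement is the Claim_ definition above) =====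
theorem pat_spec : Claim_equal_pat := by
  intro s _
  show pat s = pat_alt s
  rw [pat, pat_alt, pvPatBLoop_cons]
  simp [pvPatBLoop]
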